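-- pv_equiv track=rewrite | github.com/free-free/algorithm | search/tmp.py | find_first_geq_by_bs
-- ===== SOURCE A (Python) =====
-- def find_first_geq_by_bs(a, val):
--     low, mid, high = 0, 0, len(a) - 1
--     while low <= high:
--         mid = low + ((high - low) >> 2)
--         if a[mid] >= val:
--             if mid == 0 or a[mid - 1] < val:
--                 return mid
--             high = mid -1
--         else:
--             low = mid + 1
--     return -1
-- ===== SOURCE B (Python) =====
-- def find_first_geq_by_bs(a, val):
--     # simpler: single left-to-right scan; first index with a[i] >= val, else -1
--     for i, x in enumerate(a):
--         if x >= val: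
--             return i
--     return -1
-- ===== Notes on version B (the rewrite author's own statement) =====
-- stated objective: simpler
-- what changed: Replaced the interval-maintaining binary search (low/mid/high with a >>2 quarter split) by a single linear scan that returns the first index with a[i] >= val.
-- outside the precondition, e.g. on find_first_geq_by_bs([1, 0, 0, 0, 0], 1): A returns -1, B returns 0
import Mathlib
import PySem

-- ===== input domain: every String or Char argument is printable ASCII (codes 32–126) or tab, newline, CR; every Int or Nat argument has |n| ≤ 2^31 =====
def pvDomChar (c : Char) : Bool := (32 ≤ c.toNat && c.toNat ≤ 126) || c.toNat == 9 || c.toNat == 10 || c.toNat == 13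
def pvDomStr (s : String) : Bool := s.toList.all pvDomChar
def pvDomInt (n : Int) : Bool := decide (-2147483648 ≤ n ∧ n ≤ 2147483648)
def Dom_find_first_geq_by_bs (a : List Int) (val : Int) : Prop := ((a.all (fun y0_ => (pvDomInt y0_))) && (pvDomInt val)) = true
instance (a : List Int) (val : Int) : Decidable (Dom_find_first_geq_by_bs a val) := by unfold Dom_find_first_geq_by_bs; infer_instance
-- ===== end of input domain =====

-- B replaces A's low/high binary search by a single left-to-right scan for the first a[i] >= val
-- (objective: simpler); proved equal on sorted inputs (Pre_), the domain on which a binary search is meaningful.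

-- ===== PORT A =====
-- the while-loop of A; a[mid] is in range whenever 0 ≤ low ≤ mid ≤ high ≤ len-1, so pyGetD's
-- default is unreachable on the loop's reachable states (initial call low=0, high=len-1)
def pvBsLoop (a : List Int) (val low high : Int) : Int :=
  if low ≤ high then
    let mid := low + ((high - low) >>> (2 : Nat))   -- Python's '>> 2' is Lean's '>>> 2'
    if PySem.List.pyGetD a mid 0 ≥ val then
      if mid = 0 ∨ PySem.List.pyGetD a (mid - 1) 0 < val then mid
      else pvBsLoop a val low (mid - 1)
    else pvBsLoop a val (mid + 1) high
  else -1
termination_by (high + 1 - low).toNat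
decreasing_by
  · have h4 : (high - low) >>> (2 : Nat) = (high - low) / 4 := by
      rw [Int.shiftRight_eq_div_pow]; norm_num
    omega
  · have h4 : (high - low) >>> (2 : Nat) = (high - low) / 4 := by
      rw [Int.shiftRight_eq_div_pow]; norm_num
    omega

def find_first_geq_by_bs (a : List Int) (val : Int) : Int :=
  pvBsLoop a val 0 ((a.length : Int) - 1)

-- ===== PORT B =====
-- the 'for i, x in enumerate(a)' loop of Source B, carrying the running index i
def pvScanGo (val : Int) (xs : List Int) (i : Int) : Int :=
  match xs with
  | [] => -1
  | x :: rest => if x ≥ val then i else pvScanGo val rest (i + 1)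

def find_first_geq_by_bs_alt (a : List Int) (val : Int) : Int :=
  pvScanGo val a 0

-- ===== PRECONDITION & SPEC =====
-- Pre_ excludes inputs where the set {i | a[i] >= val} is not a suffix of the index range (e.g.
-- unsorted lists with a geq element before a smaller one): A is a binary search, which assumes the
-- geq-predicate is monotone along the list; its answer elsewhere is an accident of its probe
-- sequence that no re-implementation should match. Every sorted list satisfies Pre_ for every val.
def Pre_find_first_geq_by_bs (a : List Int) (val : Int) : Prop :=
  ∀ (i : Nat), i < a.length → ∀ (j : Nat), j < a.length → i < j → val ≤ a[i]! → val ≤ a[j]!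

instance (a : List Int) (val : Int) : Decidable (Pre_find_first_geq_by_bs a val) := by
  unfold Pre_find_first_geq_by_bs; infer_instance

def pvWitness_find_first_geq_by_bs : List Int × Int := ([0, 1, 1, 3], 1)

def Spec_find_first_geq_by_bs (a : List Int) (val : Int) (out : Int) : Prop :=
  out = find_first_geq_by_bs_alt a val
instance (a : List Int) (val : Int) (out : Int) : Decidable (Spec_find_first_geq_by_bs a val out) := by
  unfold Spec_find_first_geq_by_bs; infer_instance

-- ===== CLAIM =====
def Claim_equal_find_first_geq_by_bs : Prop :=
  ∀ (a : List Int) (val : Int), Dom_find_first_geq_by_bs a val →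
    Pre_find_first_geq_by_bs a val →
    Spec_find_first_geq_by_bs a val (find_first_geq_by_bs a val)

-- ===== LEMMAS AND PROOFS =====

-- B's scan computes the first index satisfying the predicate, offset by the carried index i.
theorem pvScanGo_eq_findIdx? (val : Int) (xs : List Int) (i : Int) :
    pvScanGo val xs i =
      (match xs.findIdx? (fun x => decide (val ≤ x)) with
       | some k => i + (k : Int)
       | none => -1) := by
  induction xs generalizing i with
  | nil => simp [pvScanGo]
  | cons x rest ih =>
    by_cases hx : val ≤ x
    · simp [pvScanGo, List.findIdx?_cons, hx, ge_iff_le]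
    · simp only [pvScanGo, List.findIdx?_cons, ge_iff_le, hx, decide_eq_true_eq,
        if_false, ih (i + 1)]
      cases h : rest.findIdx? (fun x => decide (val ≤ x)) with
      | none => rfl
      | some k => show (i + 1) + (k:Int) = i + ((k:Int) + 1); omega

-- A's loop, under sortedness and the invariant that the first-geq index (if any) lies in
-- [low, high] with 0 ≤ low and high ≤ len-1, returns that first-geq index, else -1.
theorem pvBsLoop_eq (a : List Int) (val low high : Int)
    (hs : ∀ (i : Nat), i < a.length → ∀ (j : Nat), j < a.length → i < j → val ≤ a[i]! → val ≤ a[j]!)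
    (h0 : 0 ≤ low) (h1 : high ≤ (a.length : Int) - 1)
    (hk : ∀ k : Nat, a.findIdx? (fun x => decide (val ≤ x)) = some k →
          low ≤ (k : Int) ∧ (k : Int) ≤ high) :
    pvBsLoop a val low high =
      (match a.findIdx? (fun x => decide (val ≤ x)) with
       | some k => ((k : Int))
       | none => -1) := by
  have hsg : ∀ (i j : Nat) (_ : i < a.length) (_ : j < a.length), i < j → val ≤ a[i] → val ≤ a[j] := by
    intro i j hi hj hij hvi
    have := hs i hi j hj hij
    simp only [getElem!_pos, hi, hj] at this
    exact this hvi
  rw [pvBsLoop]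
  by_cases hlh : low ≤ high
  · simp only [hlh, if_true]
    have h4 : (high - low) >>> (2 : Nat) = (high - low) / 4 := by
      rw [Int.shiftRight_eq_div_pow]; norm_num
    set mid := low + ((high - low) >>> (2 : Nat)) with hmid
    have hmlo : low ≤ mid := by omega
    have hmhi : mid ≤ high := by omega
    have hmlen : mid.toNat < a.length := by omega
    have hmget : PySem.List.pyGetD a mid 0 = a[mid.toNat] :=
      by apply PySem.List.pyGetD_eq_getElem <;> omega
    by_cases hge : val ≤ a[mid.toNat]
    · -- a[mid] >= val
      rw [hmget]
      simp only [ge_iff_le, hge, if_true]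
      by_cases hfirst : mid = 0 ∨ PySem.List.pyGetD a (mid - 1) 0 < val
      · -- returns mid: show findIdx? = some mid.toNat
        simp only [hfirst, if_true]
        have hfi : a.findIdx? (fun x => decide (val ≤ x)) = some mid.toNat := by
          rw [List.findIdx?_eq_some_iff_getElem]
          refine ⟨hmlen, by simpa using hge, ?_⟩
          intro j hj
          simp only [decide_eq_true_eq]
          intro hvj
          rcases hfirst with h0' | hlt
          · omega
          · have hprev : PySem.List.pyGetD a (mid - 1) 0 = a[(mid - 1).toNat] :=
              by apply PySem.List.pyGetD_eq_getElem <;> omega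
            rw [hprev] at hlt
            rcases Nat.lt_or_ge j (mid - 1).toNat with h | h
            · have := hsg j (mid - 1).toNat (by omega) (by omega) h hvj
              omega
            · have : j = (mid - 1).toNat := by omega
              subst this; omega
        rw [hfi]
        show mid = ((mid.toNat : Int))
        omega
      · -- not first: recurse left with high = mid - 1
        simp only [hfirst, if_false]
        have hm0 : ¬ mid = 0 := fun h => hfirst (Or.inl h)
        have hprevle : val ≤ PySem.List.pyGetD a (mid - 1) 0 := by
          by_contra h; exact hfirst (Or.inr (by omega))
        have hprev : PySem.List.pyGetD a (mid - 1) 0 = a[(mid - 1).toNat] :=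
          by apply PySem.List.pyGetD_eq_getElem <;> omega
        rw [hprev] at hprevle
        apply pvBsLoop_eq a val low (mid - 1) hs h0 (by omega)
        intro k hkeq
        rcases hk k hkeq with ⟨hk1, hk2⟩
        rw [List.findIdx?_eq_some_iff_getElem] at hkeq
        rcases hkeq with ⟨hklen, hkp, hkmin⟩
        refine ⟨hk1, ?_⟩
        -- first-geq index k ≤ mid - 1 since a[mid-1] ≥ val
        by_contra hcon
        have : (mid - 1).toNat < k := by omega
        have := hkmin (mid - 1).toNat this
        simp only [decide_eq_true_eq] at this
        exact this hprevle
    · -- a[mid] < val: recurse right with low = mid + 1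
      rw [hmget]
      simp only [ge_iff_le, hge, if_false]
      apply pvBsLoop_eq a val (mid + 1) high hs (by omega) h1
      intro k hkeq
      rcases hk k hkeq with ⟨hk1, hk2⟩
      rw [List.findIdx?_eq_some_iff_getElem] at hkeq
      rcases hkeq with ⟨hklen, hkp, hkmin⟩
      simp only [decide_eq_true_eq] at hkp
      refine ⟨?_, hk2⟩
      -- k > mid since a[mid] < val ≤ a[k] and a is sorted
      by_contra hcon
      have hkm : k ≤ mid.toNat := by omega
      rcases Nat.lt_or_ge k mid.toNat with h | h
      · exact absurd (hsg k mid.toNat (by omega) hmlen h hkp) (by omega)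
      · have : k = mid.toNat := by omega
        subst this; omega
  · simp only [hlh, if_false]
    cases h : a.findIdx? (fun x => decide (val ≤ x)) with
    | none => rfl
    | some k => rcases hk k h with ⟨hk1, hk2⟩; omega
termination_by (high + 1 - low).toNat
decreasing_by
  · omega
  · omega

-- ===== VERDICT =====
theorem find_first_geq_by_bs_spec : Claim_equal_find_first_geq_by_bs := by
  intro a val _hdom hpre
  unfold Spec_find_first_geq_by_bs find_first_geq_by_bs find_first_geq_by_bs_alt
  rw [pvScanGo_eq_findIdx?]
  rw [pvBsLoop_eq a val 0 ((a.length : Int) - 1) hpre (by omega) (by omega)]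
  · cases h : a.findIdx? (fun x => decide (val ≤ x)) <;> simp
  · intro k hkeq
    rw [List.findIdx?_eq_some_iff_getElem] at hkeq
    rcases hkeq with ⟨hklen, _, _⟩
    omega
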